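-- pv_equiv track=rewrite | github.com/kubaniak/python-scripts | energy_levels_3d_inf_sq_well/degeneracy.py | find_degeneracy
-- ===== SOURCE A (Python) =====
-- def find_degeneracy(combinations: list) -> int:
--     length = 0
--     for i in combinations:
--         if i[0] == i[1] == i[2]:
--             length += 1
--         elif i[0] == i[1] or i[0] == i[2] or i[1] == i[2]:
--             length += 3
--         elif i[0] != i[1] and i[0] != i[2] and i[1] != i[2]:
--             length += 6
--     return length
-- ===== SOURCE B (Python) =====
-- def find_degeneracy(combinations: list) -> int:
--     total = 0
--     for i in combinations:
--         a, b, c = i[0], i[1], i[2]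
--         perms = [(a, b, c), (a, c, b), (b, a, c), (b, c, a), (c, a, b), (c, b, a)]
--         total += len(set(perms))
--     return total
-- ===== Notes on version B (the rewrite author's own statement) =====
-- stated objective: alternative
-- what changed: Instead of classifying each triple by an if/elif chain of pairwise equality tests, B computes each triple's weight as the number of distinct orderings: it lists all 6 permutations of the triple and counts the distinct ones with a set, which is 1/3/6 exactly when all/two/no components coincide.
import Mathlib
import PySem

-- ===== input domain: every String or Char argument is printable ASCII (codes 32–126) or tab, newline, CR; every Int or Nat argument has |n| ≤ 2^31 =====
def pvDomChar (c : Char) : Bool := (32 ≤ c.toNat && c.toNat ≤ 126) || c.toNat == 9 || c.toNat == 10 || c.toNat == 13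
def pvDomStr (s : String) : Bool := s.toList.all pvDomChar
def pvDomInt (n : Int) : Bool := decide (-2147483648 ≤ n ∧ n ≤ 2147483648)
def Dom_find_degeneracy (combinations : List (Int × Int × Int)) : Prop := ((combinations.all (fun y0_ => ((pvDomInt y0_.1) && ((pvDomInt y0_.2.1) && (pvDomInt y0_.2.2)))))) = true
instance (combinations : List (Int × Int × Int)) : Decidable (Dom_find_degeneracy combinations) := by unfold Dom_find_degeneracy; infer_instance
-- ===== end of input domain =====

-- ===== PORT A =====
-- if/elif chain adding 1, 3 or 6 per element
def find_degeneracy (combinations : List (Int × Int × Int)) : Int :=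
  combinations.foldl (fun length i =>
    if i.1 = i.2.1 ∧ i.2.1 = i.2.2 then length + 1
    else if i.1 = i.2.1 ∨ i.1 = i.2.2 ∨ i.2.1 = i.2.2 then length + 3
    else if i.1 ≠ i.2.1 ∧ i.1 ≠ i.2.2 ∧ i.2.1 ≠ i.2.2 then length + 6
    else length) 0

-- ===== PORT B =====
-- B: each triple's weight is the number of its distinct orderings, obtained by
-- listing all 6 permutations and counting the distinct ones with a set.
def find_degeneracy_alt (combinations : List (Int × Int × Int)) : Int :=
  combinations.foldl (fun total i =>
    let a := i.1; let b := i.2.1; let c := i.2.2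
    let perms : List (Int × Int × Int) :=
      [(a, b, c), (a, c, b), (b, a, c), (b, c, a), (c, a, b), (c, b, a)]
    total + ((PySem.Set.ofList perms).length : Int)) 0

-- ===== PRECONDITION & SPEC =====
def Spec_find_degeneracy (combinations : List (Int × Int × Int)) (out : Int) : Prop := out = find_degeneracy_alt combinations
instance (combinations : List (Int × Int × Int)) (out : Int) : Decidable (Spec_find_degeneracy combinations out) := by unfold Spec_find_degeneracy; infer_instance

-- ===== CLAIM (what is proved, stated in full; the proofs are below) =====
def Claim_equal_find_degeneracy : Prop := ∀ (combinations : List (Int × Int × Int)), Dom_find_degeneracy combinations → Spec_find_degeneracy combinations (find_degeneracy combinations)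

-- ===== LEMMAS AND PROOFS =====

-- the per-element increments of the two folds coincide
theorem step_eq (acc : Int) (i : Int × Int × Int) :
    (if i.1 = i.2.1 ∧ i.2.1 = i.2.2 then acc + 1
     else if i.1 = i.2.1 ∨ i.1 = i.2.2 ∨ i.2.1 = i.2.2 then acc + 3
     else if i.1 ≠ i.2.1 ∧ i.1 ≠ i.2.2 ∧ i.2.1 ≠ i.2.2 then acc + 6
     else acc)
    = acc + ((PySem.Set.ofList
        [(i.1, i.2.1, i.2.2), (i.1, i.2.2, i.2.1), (i.2.1, i.1, i.2.2),
         (i.2.1, i.2.2, i.1), (i.2.2, i.1, i.2.1), (i.2.2, i.2.1, i.1)]).length : Int) := by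
  obtain ⟨a, b, c⟩ := i
  by_cases hab : a = b <;> by_cases hac : a = c <;> by_cases hbc : b = c <;>
    simp_all [PySem.Set.ofList, List.foldl, Prod.ext_iff, eq_comm]

theorem folds_eq (l : List (Int × Int × Int)) (acc : Int) :
    l.foldl (fun length i =>
      if i.1 = i.2.1 ∧ i.2.1 = i.2.2 then length + 1
      else if i.1 = i.2.1 ∨ i.1 = i.2.2 ∨ i.2.1 = i.2.2 then length + 3
      else if i.1 ≠ i.2.1 ∧ i.1 ≠ i.2.2 ∧ i.2.1 ≠ i.2.2 then length + 6
      else length) acc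
    = l.foldl (fun total i =>
      let a := i.1; let b := i.2.1; let c := i.2.2
      let perms : List (Int × Int × Int) :=
        [(a, b, c), (a, c, b), (b, a, c), (b, c, a), (c, a, b), (c, b, a)]
      total + ((PySem.Set.ofList perms).length : Int)) acc := by
  induction l generalizing acc with
  | nil => rfl
  | cons x xs ih => rw [List.foldl_cons, List.foldl_cons, step_eq]; exact ih _

-- ===== VERDICT =====
theorem find_degeneracy_spec : Claim_equal_find_degeneracy := by
  intro l _
  unfold Spec_find_degeneracy find_degeneracy find_degeneracy_alt
  exact folds_eq l 0
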